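-- pv_equiv track=rewrite | github.com/AkileshVishnu/FREL_Prospect_Journey_MVP01_V2_QA | Snowflake_Streamlit_Prospect_Journey_QA_bkp/agent_sf.py | _route_tools
-- ===== SOURCE A (Python) =====
-- def _route_tools(question: str, intent: str) -> list[str]:
--     """
--     Intent-aware keyword router.
--     Selects only the tools needed for the given intent — avoids over-fetching data
--     which causes the LLM to produce padded, repetitive responses.
--     """
--     q = question.lower()
--     tools = []
--
--     # Intent-specific routing — minimal data fetch per intent
--     if intent == "SIMPLE_COUNT":
--         tools.append("get_journey_overview")
--
--     elif intent == "DROP_OFF":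
--         tools.append("get_journey_stage_dropoff")
--         tools.append("get_journey_suppression_linkage")
--
--     elif intent == "ANOMALY":
--         tools.append("get_journey_stage_dropoff")
--         tools.append("get_journey_suppression_linkage")
--         tools.append("get_journey_pace_analysis")
--
--     elif intent == "RATE_BREAKDOWN":
--         tools.append("get_journey_stage_dropoff")
--
--     elif intent == "DQ_CHECK":
--         tools.append("get_funnel_metrics")
--         tools.append("get_rejection_analysis")
--
--     elif intent == "ENGAGEMENT_METRICS":
--         tools.append("get_sfmc_engagement_stats")
--
--     elif intent == "RECOMMENDATION":
--         tools.append("get_journey_stage_dropoff")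
--         tools.append("get_journey_suppression_linkage")
--         tools.append("get_sfmc_engagement_stats")
--
--     elif intent == "JOURNEY_HEALTH":
--         tools.append("get_journey_overview")
--         tools.append("get_journey_stage_dropoff")
--         tools.append("get_journey_suppression_linkage")
--
--     else:
--         # ANALYTICAL — fallback: keyword routing
--         is_journey = any(w in q for w in ["stage", "journey", "prospect journey", "phase"])
--         if is_journey:
--             if any(w in q for w in ["overview", "health", "summary", "total", "how is"]):
--                 tools.append("get_journey_overview")
--             if any(w in q for w in ["drop", "reach", "progression", "funnel", "where"]):
--                 tools.append("get_journey_stage_dropoff")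
--             if any(w in q for w in ["suppressed", "suppression", "why", "reason", "blocked"]):
--                 tools.append("get_journey_suppression_linkage")
--             if any(w in q for w in ["timing", "pace", "days", "interval", "on time"]):
--                 tools.append("get_journey_pace_analysis")
--             if not tools:
--                 tools.append("get_journey_stage_dropoff")
--
--         if any(w in q for w in ["rejection", "rejected", "invalid", "refused"]):
--             tools.append("get_rejection_analysis")
--         if any(w in q for w in ["engagement", "open rate", "click rate", "bounce", "unsubscribe"]):
--             tools.append("get_sfmc_engagement_stats")
--         if any(w in q for w in ["what happened on", "drop on", "issue on"]) and any(c.isdigit() for c in q):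
--             tools.append("get_drop_analysis")
--         if not tools:
--             tools.append("get_funnel_metrics")
--
--     # Always allow prospect tracing regardless of intent
--     if any(w in q for w in ["trace", "track", "fip", "individual prospect", "specific prospect"]):
--         tools.append("trace_prospect")
--
--     return list(dict.fromkeys(tools))  # deduplicate, preserve order
-- ===== SOURCE B (Python) =====
-- # B compiles the routing policy into a tiny instruction program and evaluates it
-- # with a recursive interpreter that dedups online (emit skips already-chosen tools).
--
-- _INTENT_PLANS = {
--     "SIMPLE_COUNT": ["get_journey_overview"],
--     "DROP_OFF": ["get_journey_stage_dropoff", "get_journey_suppression_linkage"],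
--     "ANOMALY": ["get_journey_stage_dropoff", "get_journey_suppression_linkage",
--                 "get_journey_pace_analysis"],
--     "RATE_BREAKDOWN": ["get_journey_stage_dropoff"],
--     "DQ_CHECK": ["get_funnel_metrics", "get_rejection_analysis"],
--     "ENGAGEMENT_METRICS": ["get_sfmc_engagement_stats"],
--     "RECOMMENDATION": ["get_journey_stage_dropoff", "get_journey_suppression_linkage",
--                        "get_sfmc_engagement_stats"],
--     "JOURNEY_HEALTH": ["get_journey_overview", "get_journey_stage_dropoff",
--                        "get_journey_suppression_linkage"],
-- }
--
-- _FALLBACK = [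
--     ("group", ["stage", "journey", "prospect journey", "phase"], [
--         ("kw", ["overview", "health", "summary", "total", "how is"], "get_journey_overview"),
--         ("kw", ["drop", "reach", "progression", "funnel", "where"], "get_journey_stage_dropoff"),
--         ("kw", ["suppressed", "suppression", "why", "reason", "blocked"], "get_journey_suppression_linkage"),
--         ("kw", ["timing", "pace", "days", "interval", "on time"], "get_journey_pace_analysis"),
--         ("empty", "get_journey_stage_dropoff"),
--     ]),
--     ("kw", ["rejection", "rejected", "invalid", "refused"], "get_rejection_analysis"),
--     ("kw", ["engagement", "open rate", "click rate", "bounce", "unsubscribe"], "get_sfmc_engagement_stats"),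
--     ("kwdigit", ["what happened on", "drop on", "issue on"], "get_drop_analysis"),
--     ("empty", "get_funnel_metrics"),
-- ]
--
-- _TRACE = ("kw", ["trace", "track", "fip", "individual prospect", "specific prospect"],
--           "trace_prospect")
--
--
-- def _hit(kws, q):
--     return any(w in q for w in kws)
--
--
-- def _emit(acc, tool):
--     return acc if tool in acc else acc + [tool]
--
--
-- def _run_sub(prog, q, acc):
--     """Evaluate a group body: only 'kw' and 'empty' instructions."""
--     if not prog:
--         return acc
--     ins = prog[0]
--     if ins[0] == "kw":
--         if _hit(ins[1], q):
--             acc = _emit(acc, ins[2])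
--     else:  # "empty"
--         if not acc:
--             acc = _emit(acc, ins[1])
--     return _run_sub(prog[1:], q, acc)
--
--
-- def _run(prog, q, acc):
--     if not prog:
--         return acc
--     ins = prog[0]
--     op = ins[0]
--     if op == "const":
--         acc = _emit(acc, ins[1])
--     elif op == "kw":
--         if _hit(ins[1], q):
--             acc = _emit(acc, ins[2])
--     elif op == "kwdigit":
--         if _hit(ins[1], q) and any(c.isdigit() for c in q):
--             acc = _emit(acc, ins[2])
--     elif op == "group":
--         if _hit(ins[1], q):
--             acc = _run_sub(ins[2], q, acc)
--     else:  # "empty"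
--         if not acc:
--             acc = _emit(acc, ins[1])
--     return _run(prog[1:], q, acc)
--
--
-- def _compile(intent):
--     if intent in _INTENT_PLANS:
--         core = [("const", t) for t in _INTENT_PLANS[intent]]
--     else:
--         core = _FALLBACK
--     return core + [_TRACE]
--
--
-- def _route_tools(question: str, intent: str) -> list[str]:
--     return _run(_compile(intent), question.lower(), [])
-- ===== Notes on version B (the rewrite author's own statement) =====
-- stated objective: alternative
-- what changed: Instead of A's imperative if/elif cascade of conditional appends followed by dict.fromkeys dedup, B compiles the routing policy (intent plans, keyword rules, empty-defaults, trace rule) into a small instruction program and evaluates it with a recursive interpreter whose emit step dedups online.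
import Mathlib
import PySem

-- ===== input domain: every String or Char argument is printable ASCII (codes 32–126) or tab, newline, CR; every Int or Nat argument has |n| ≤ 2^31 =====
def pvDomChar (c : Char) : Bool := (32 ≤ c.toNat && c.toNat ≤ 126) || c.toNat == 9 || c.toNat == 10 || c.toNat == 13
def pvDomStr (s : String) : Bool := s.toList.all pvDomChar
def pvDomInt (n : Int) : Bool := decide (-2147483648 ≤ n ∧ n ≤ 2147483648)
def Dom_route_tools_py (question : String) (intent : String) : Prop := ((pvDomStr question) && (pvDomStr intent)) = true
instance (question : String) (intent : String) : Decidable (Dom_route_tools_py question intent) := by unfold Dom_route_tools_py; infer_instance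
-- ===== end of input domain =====

-- B replaces A's imperative branch-and-append cascade by compiling the routing policy
-- into a small instruction program evaluated by a recursive interpreter that dedups
-- online (objective: alternative decomposition, same cost).

-- ===== PORT A =====
-- any(w in q for w in ws)
def pvAnyIn (ws : List String) (q : String) : Bool := ws.any (fun w => PySem.Str.isIn w q)

def route_tools_py (question : String) (intent : String) : List String :=
  let q := PySem.Str.lower question
  let tools : List String := []
  let tools :=
    if intent == "SIMPLE_COUNT" then tools ++ ["get_journey_overview"]
    else if intent == "DROP_OFF" then
      tools ++ ["get_journey_stage_dropoff"] ++ ["get_journey_suppression_linkage"]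
    else if intent == "ANOMALY" then
      tools ++ ["get_journey_stage_dropoff"] ++ ["get_journey_suppression_linkage"]
            ++ ["get_journey_pace_analysis"]
    else if intent == "RATE_BREAKDOWN" then tools ++ ["get_journey_stage_dropoff"]
    else if intent == "DQ_CHECK" then
      tools ++ ["get_funnel_metrics"] ++ ["get_rejection_analysis"]
    else if intent == "ENGAGEMENT_METRICS" then tools ++ ["get_sfmc_engagement_stats"]
    else if intent == "RECOMMENDATION" then
      tools ++ ["get_journey_stage_dropoff"] ++ ["get_journey_suppression_linkage"]
            ++ ["get_sfmc_engagement_stats"]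
    else if intent == "JOURNEY_HEALTH" then
      tools ++ ["get_journey_overview"] ++ ["get_journey_stage_dropoff"]
            ++ ["get_journey_suppression_linkage"]
    else
      -- ANALYTICAL — fallback: keyword routing
      let is_journey := pvAnyIn ["stage", "journey", "prospect journey", "phase"] q
      let tools :=
        if is_journey then
          let tools := if pvAnyIn ["overview", "health", "summary", "total", "how is"] q
                       then tools ++ ["get_journey_overview"] else tools
          let tools := if pvAnyIn ["drop", "reach", "progression", "funnel", "where"] q
                       then tools ++ ["get_journey_stage_dropoff"] else tools
          let tools := if pvAnyIn ["suppressed", "suppression", "why", "reason", "blocked"] q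
                       then tools ++ ["get_journey_suppression_linkage"] else tools
          let tools := if pvAnyIn ["timing", "pace", "days", "interval", "on time"] q
                       then tools ++ ["get_journey_pace_analysis"] else tools
          let tools := if tools.isEmpty then tools ++ ["get_journey_stage_dropoff"] else tools
          tools
        else tools
      let tools := if pvAnyIn ["rejection", "rejected", "invalid", "refused"] q
                   then tools ++ ["get_rejection_analysis"] else tools
      let tools := if pvAnyIn ["engagement", "open rate", "click rate", "bounce", "unsubscribe"] q
                   then tools ++ ["get_sfmc_engagement_stats"] else tools
      let tools := if pvAnyIn ["what happened on", "drop on", "issue on"] q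
                      && q.toList.any PySem.Chars.isdigit
                   then tools ++ ["get_drop_analysis"] else tools
      let tools := if tools.isEmpty then tools ++ ["get_funnel_metrics"] else tools
      tools
  let tools := if pvAnyIn ["trace", "track", "fip", "individual prospect", "specific prospect"] q
               then tools ++ ["trace_prospect"] else tools
  PySem.List.dedup tools

-- ===== PORT B =====
-- the instruction DSL of Source B (group bodies carry only 'kw'/'empty' sub-instructions)
inductive PvSub : Type
  | kw : List String → String → PvSub
  | empty : String → PvSub

inductive PvInstr : Type
  | const : String → PvInstr
  | kw : List String → String → PvInstr
  | kwdigit : List String → String → PvInstr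
  | group : List String → List PvSub → PvInstr
  | empty : String → PvInstr

def pvIntentPlans : PySem.Dict String (List String) :=
  PySem.Dict.mk [
    ("SIMPLE_COUNT", ["get_journey_overview"]),
    ("DROP_OFF", ["get_journey_stage_dropoff", "get_journey_suppression_linkage"]),
    ("ANOMALY", ["get_journey_stage_dropoff", "get_journey_suppression_linkage",
                 "get_journey_pace_analysis"]),
    ("RATE_BREAKDOWN", ["get_journey_stage_dropoff"]),
    ("DQ_CHECK", ["get_funnel_metrics", "get_rejection_analysis"]),
    ("ENGAGEMENT_METRICS", ["get_sfmc_engagement_stats"]),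
    ("RECOMMENDATION", ["get_journey_stage_dropoff", "get_journey_suppression_linkage",
                        "get_sfmc_engagement_stats"]),
    ("JOURNEY_HEALTH", ["get_journey_overview", "get_journey_stage_dropoff",
                        "get_journey_suppression_linkage"])]

def pvFallback : List PvInstr := [
  .group ["stage", "journey", "prospect journey", "phase"] [
    .kw ["overview", "health", "summary", "total", "how is"] "get_journey_overview",
    .kw ["drop", "reach", "progression", "funnel", "where"] "get_journey_stage_dropoff",
    .kw ["suppressed", "suppression", "why", "reason", "blocked"] "get_journey_suppression_linkage",
    .kw ["timing", "pace", "days", "interval", "on time"] "get_journey_pace_analysis",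
    .empty "get_journey_stage_dropoff"],
  .kw ["rejection", "rejected", "invalid", "refused"] "get_rejection_analysis",
  .kw ["engagement", "open rate", "click rate", "bounce", "unsubscribe"] "get_sfmc_engagement_stats",
  .kwdigit ["what happened on", "drop on", "issue on"] "get_drop_analysis",
  .empty "get_funnel_metrics"]

def pvTrace : PvInstr :=
  .kw ["trace", "track", "fip", "individual prospect", "specific prospect"] "trace_prospect"

def pvEmit (acc : List String) (tool : String) : List String :=
  if acc.contains tool then acc else acc ++ [tool]

def pvRunSub : List PvSub → String → List String → List String
  | [], _, acc => acc
  | .kw kws t :: rest, q, acc =>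
      pvRunSub rest q (if pvAnyIn kws q then pvEmit acc t else acc)
  | .empty t :: rest, q, acc =>
      pvRunSub rest q (if acc.isEmpty then pvEmit acc t else acc)

def pvRun : List PvInstr → String → List String → List String
  | [], _, acc => acc
  | .const t :: rest, q, acc => pvRun rest q (pvEmit acc t)
  | .kw kws t :: rest, q, acc =>
      pvRun rest q (if pvAnyIn kws q then pvEmit acc t else acc)
  | .kwdigit kws t :: rest, q, acc =>
      pvRun rest q (if pvAnyIn kws q && q.toList.any PySem.Chars.isdigit
                    then pvEmit acc t else acc)
  | .group kws sub :: rest, q, acc =>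
      pvRun rest q (if pvAnyIn kws q then pvRunSub sub q acc else acc)
  | .empty t :: rest, q, acc =>
      pvRun rest q (if acc.isEmpty then pvEmit acc t else acc)

def pvCompile (intent : String) : List PvInstr :=
  (match pvIntentPlans.get? intent with
   | some ts => ts.map (fun t => PvInstr.const t)
   | none => pvFallback) ++ [pvTrace]

def route_tools_py_alt (question : String) (intent : String) : List String :=
  pvRun (pvCompile intent) (PySem.Str.lower question) []

-- ===== PRECONDITION & SPEC =====
def Spec_route_tools_py (question : String) (intent : String) (out : List String) : Prop := out = route_tools_py_alt question intent
instance (question : String) (intent : String) (out : List String) : Decidable (Spec_route_tools_py question intent out) := by unfold Spec_route_tools_py; infer_instance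

-- ===== CLAIM (what is proved, stated in full; the proofs are below) =====
def Claim_equal_route_tools_py : Prop := ∀ (question : String) (intent : String), Dom_route_tools_py question intent → Spec_route_tools_py question intent (route_tools_py question intent)

-- ===== LEMMAS AND PROOFS =====
theorem route_tools_py_eq (question intent : String) :
    route_tools_py question intent = route_tools_py_alt question intent := by
  unfold route_tools_py route_tools_py_alt pvCompile
  by_cases h1 : intent = "SIMPLE_COUNT"
  · subst h1; simp [pvIntentPlans, PySem.Dict.get?, pvTrace, pvRun, pvEmit]; split <;> decide
  by_cases h2 : intent = "DROP_OFF"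
  · subst h2; simp [pvIntentPlans, PySem.Dict.get?, pvTrace, pvRun, pvEmit]; split <;> decide
  by_cases h3 : intent = "ANOMALY"
  · subst h3; simp [pvIntentPlans, PySem.Dict.get?, pvTrace, pvRun, pvEmit]; split <;> decide
  by_cases h4 : intent = "RATE_BREAKDOWN"
  · subst h4; simp [pvIntentPlans, PySem.Dict.get?, pvTrace, pvRun, pvEmit]; split <;> decide
  by_cases h5 : intent = "DQ_CHECK"
  · subst h5; simp [pvIntentPlans, PySem.Dict.get?, pvTrace, pvRun, pvEmit]; split <;> decide
  by_cases h6 : intent = "ENGAGEMENT_METRICS"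
  · subst h6; simp [pvIntentPlans, PySem.Dict.get?, pvTrace, pvRun, pvEmit]; split <;> decide
  by_cases h7 : intent = "RECOMMENDATION"
  · subst h7; simp [pvIntentPlans, PySem.Dict.get?, pvTrace, pvRun, pvEmit]; split <;> decide
  by_cases h8 : intent = "JOURNEY_HEALTH"
  · subst h8; simp [pvIntentPlans, PySem.Dict.get?, pvTrace, pvRun, pvEmit]; split <;> decide
  have a1 : (intent == "SIMPLE_COUNT") = false := beq_eq_false_iff_ne.mpr h1
  have a2 : (intent == "DROP_OFF") = false := beq_eq_false_iff_ne.mpr h2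
  have a3 : (intent == "ANOMALY") = false := beq_eq_false_iff_ne.mpr h3
  have a4 : (intent == "RATE_BREAKDOWN") = false := beq_eq_false_iff_ne.mpr h4
  have a5 : (intent == "DQ_CHECK") = false := beq_eq_false_iff_ne.mpr h5
  have a6 : (intent == "ENGAGEMENT_METRICS") = false := beq_eq_false_iff_ne.mpr h6
  have a7 : (intent == "RECOMMENDATION") = false := beq_eq_false_iff_ne.mpr h7
  have a8 : (intent == "JOURNEY_HEALTH") = false := beq_eq_false_iff_ne.mpr h8
  have b1 : ("SIMPLE_COUNT" == intent) = false := beq_eq_false_iff_ne.mpr (Ne.symm h1)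
  have b2 : ("DROP_OFF" == intent) = false := beq_eq_false_iff_ne.mpr (Ne.symm h2)
  have b3 : ("ANOMALY" == intent) = false := beq_eq_false_iff_ne.mpr (Ne.symm h3)
  have b4 : ("RATE_BREAKDOWN" == intent) = false := beq_eq_false_iff_ne.mpr (Ne.symm h4)
  have b5 : ("DQ_CHECK" == intent) = false := beq_eq_false_iff_ne.mpr (Ne.symm h5)
  have b6 : ("ENGAGEMENT_METRICS" == intent) = false := beq_eq_false_iff_ne.mpr (Ne.symm h6)
  have b7 : ("RECOMMENDATION" == intent) = false := beq_eq_false_iff_ne.mpr (Ne.symm h7)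
  have b8 : ("JOURNEY_HEALTH" == intent) = false := beq_eq_false_iff_ne.mpr (Ne.symm h8)
  simp only [a1, a2, a3, a4, a5, a6, a7, a8, b1, b2, b3, b4, b5, b6, b7, b8,
    Bool.false_eq_true, if_false, pvIntentPlans, PySem.Dict.get?, List.find?,
    Option.map_none, pvFallback, pvTrace, List.cons_append, List.nil_append,
    pvRun, pvRunSub]
  generalize (PySem.Str.lower question) = q
  generalize pvAnyIn ["stage", "journey", "prospect journey", "phase"] q = j
  generalize pvAnyIn ["overview", "health", "summary", "total", "how is"] q = c1
  generalize pvAnyIn ["drop", "reach", "progression", "funnel", "where"] q = c2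
  generalize pvAnyIn ["suppressed", "suppression", "why", "reason", "blocked"] q = c3
  generalize pvAnyIn ["timing", "pace", "days", "interval", "on time"] q = c4
  generalize pvAnyIn ["rejection", "rejected", "invalid", "refused"] q = g1
  generalize pvAnyIn ["engagement", "open rate", "click rate", "bounce", "unsubscribe"] q = g2
  generalize pvAnyIn ["what happened on", "drop on", "issue on"] q = bd
  generalize q.toList.any PySem.Chars.isdigit = bg
  generalize pvAnyIn ["trace", "track", "fip", "individual prospect", "specific prospect"] q = t
  revert j c1 c2 c3 c4 g1 g2 bd bg t
  decide

-- ===== VERDICT (by name: the statement is the Claim_ definition above) =====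
theorem route_tools_py_spec : Claim_equal_route_tools_py := by
  intro question intent _
  unfold Spec_route_tools_py
  exact route_tools_py_eq question intent
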